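-- pv_equiv track=rewrite | github.com/ld3214/FFT | FFT_input/golden.py | radix2_dit_fft_bittrue
-- ===== SOURCE A (Python) =====
-- def bit_reverse(val, n_bits):
--     """位反转函数"""
--     res = 0
--     for _ in range(n_bits):
--         res = (res << 1) | (val & 1)
--         val >>= 1
--     return res
--
-- def q15_complex_mul(dr, di, tr, ti):
--     """
--     Q15 复数乘法
--     数学公式: (dr + j*di) * (tr + j*ti)
--     硬件实现通常是先进行全精度乘法，相加减后再移位。
--     """
--     prod_r = (dr * tr) - (di * ti)
--     prod_i = (dr * ti) + (di * tr)
--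
--     # 算术右移 15 位 (模拟 Verilog 的 '>>> 15')
--     # 注意：如果你的 RTL 加了 1<<14 进行四舍五入(Rounding)，请改为:
--     # res_r = (prod_r + 16384) >> 15
--     res_r = prod_r >> 15
--     res_i = prod_i >> 15
--
--     # 防止极端情况溢出，钳位在 16-bit signed 范围内
--     res_r = max(-32768, min(32767, res_r))
--     res_i = max(-32768, min(32767, res_i))
--
--     return res_r, res_i
--
-- def radix2_dit_fft_bittrue(x_r, x_i, tw_r, tw_i, n_points=1024):
--     """
--     标准的 Radix-2 时间抽取 (DIT) FFT
--     完全定点化，每级包含 >> 1 以防溢出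
--     """
--     n_bits = 10 # log2(1024)
--
--     # 1. 位反转 (Bit-reversal)
--     X_r = [0] * n_points
--     X_i = [0] * n_points
--     for i in range(n_points):
--         rev_i = bit_reverse(i, n_bits)
--         X_r[rev_i] = x_r[i]
--         X_i[rev_i] = x_i[i]
--
--     # 2. 蝶形运算 (10 个 Stage)
--     # m 代表当前级参与一次完整蝶形的点数跨度 (2, 4, 8 ... 1024)
--     for stage in range(1, n_bits + 1):
--         m = 1 << stage
--         half_m = m >> 1
--         # stride 控制旋转因子的步进。N=1024时，第一级stride=512，最后一级stride=1
--         stride = n_points // m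
--
--         for k in range(0, n_points, m):
--             for j in range(half_m):
--                 # 获取旋转因子
--                 tw_idx = j * stride
--                 t_r = tw_r[tw_idx]
--                 t_i = tw_i[tw_idx]
--
--                 # 读取蝶形下半支路的数据
--                 bot_r = X_r[k + j + half_m]
--                 bot_i = X_i[k + j + half_m]
--
--                 # 蝶形上半支路的数据
--                 top_r = X_r[k + j]
--                 top_i = X_i[k + j]
--
--                 # 复数乘法: bot * twiddle
--                 mul_r, mul_i = q15_complex_mul(bot_r, bot_i, t_r, t_i)
--
--                 # 蝶形加减法与缩放 (Divide by 2) 防止溢出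
--                 # 如果硬件采用了进位四舍五入，应改为 (A + B + 1) >> 1
--                 new_top_r = (top_r + mul_r) >> 1
--                 new_top_i = (top_i + mul_i) >> 1
--                 new_bot_r = (top_r - mul_r) >> 1
--                 new_bot_i = (top_i - mul_i) >> 1
--
--                 # 写回
--                 X_r[k + j] = new_top_r
--                 X_i[k + j] = new_top_i
--                 X_r[k + j + half_m] = new_bot_r
--                 X_i[k + j + half_m] = new_bot_i
--
--     return X_r, X_i
-- ===== SOURCE B (Python) =====
-- def _q15_cmul(d, t):
--     """Q15 complex multiply of two (re, im) pairs, arithmetic shift and clamp."""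
--     dr, di = d
--     tr, ti = t
--     pr = dr * tr - di * ti
--     pi = dr * ti + di * tr
--     rr = pr >> 15
--     ri = pi >> 15
--     rr = max(-32768, min(32767, rr))
--     ri = max(-32768, min(32767, ri))
--     return rr, ri
--
-- def _fft(pts, tw, n_points):
--     """Recursive Cooley-Tukey DIT on a list of (re, im) pairs.
--
--     Twiddle indices are taken with the GLOBAL stride n_points // len(pts),
--     and every butterfly output is arithmetically shifted right by one, so the
--     arithmetic is bit-true to the fixed-point hardware model."""
--     m = len(pts)
--     if m <= 1:
--         return pts
--     evens = _fft(pts[0::2], tw, n_points)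
--     odds = _fft(pts[1::2], tw, n_points)
--     half = m // 2
--     stride = n_points // m
--     tops = []
--     bots = []
--     for j in range(half):
--         mr, mi = _q15_cmul(odds[j], tw[j * stride])
--         er, ei = evens[j]
--         tops.append(((er + mr) >> 1, (ei + mi) >> 1))
--         bots.append(((er - mr) >> 1, (ei - mi) >> 1))
--     return tops + bots
--
-- def radix2_dit_fft_bittrue(x_r, x_i, tw_r, tw_i, n_points=1024):
--     pts = [(x_r[i], x_i[i]) for i in range(n_points)]
--     tw = list(zip(tw_r, tw_i))
--     out = _fft(pts, tw, n_points)
--     return [p[0] for p in out], [p[1] for p in out]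
-- ===== Notes on version B (the rewrite author's own statement) =====
-- stated objective: alternative
-- what changed: Replaces the iterative in-place FFT (explicit 10-bit bit-reversal permutation followed by ten nested butterfly-stage loops mutating two flat arrays) with a recursive Cooley-Tukey decomposition on (re,im) pairs: split into even/odd halves, recurse, combine with the same Q15 multiply, >>1 scaling and clamping; no bit-reversal table and no in-place writes.
import Mathlib
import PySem

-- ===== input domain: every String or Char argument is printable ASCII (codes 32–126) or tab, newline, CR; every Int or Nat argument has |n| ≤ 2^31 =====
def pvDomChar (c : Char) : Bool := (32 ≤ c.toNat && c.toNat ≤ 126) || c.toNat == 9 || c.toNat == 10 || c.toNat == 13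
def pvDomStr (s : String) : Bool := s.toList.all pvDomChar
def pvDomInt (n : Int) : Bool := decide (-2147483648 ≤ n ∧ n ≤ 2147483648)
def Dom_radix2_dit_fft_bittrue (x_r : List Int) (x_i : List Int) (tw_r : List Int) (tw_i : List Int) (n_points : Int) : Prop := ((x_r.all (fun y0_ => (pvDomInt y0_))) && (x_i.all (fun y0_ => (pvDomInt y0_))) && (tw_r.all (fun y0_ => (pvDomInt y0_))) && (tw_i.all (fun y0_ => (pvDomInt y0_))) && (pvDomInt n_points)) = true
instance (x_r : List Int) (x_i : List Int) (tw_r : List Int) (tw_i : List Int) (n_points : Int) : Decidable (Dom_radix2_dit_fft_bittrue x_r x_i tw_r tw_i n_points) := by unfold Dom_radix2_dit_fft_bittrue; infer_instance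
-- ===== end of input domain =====

-- B re-implements the iterative in-place 1024-point fixed-point FFT as a recursive
-- Cooley–Tukey even/odd decomposition with the same Q15 arithmetic (objective: alternative).

-- ===== PORT A =====

-- res = (res << 1) | (val & 1):  res stays ≥ 0, so this is res*2 + (val & 1), and
-- val & 1 = val mod 2 (exact for every int); val >>= 1 is floor division by 2.
def bit_reverse (val : Int) (n_bits : Int) : Int :=
  ((PySem.List.pyRange 0 n_bits 1).foldl
    (fun (s : Int × Int) _ => (s.1 * 2 + PySem.Int.mod s.2 2, PySem.Int.floordiv s.2 2))
    (0, val)).1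

def q15_complex_mul (dr di tr ti : Int) : Int × Int :=
  let prod_r := dr * tr - di * ti
  let prod_i := dr * ti + di * tr
  let res_r := prod_r >>> (15 : Nat)    -- prod_r >> 15 (arithmetic shift, floors)
  let res_i := prod_i >>> (15 : Nat)
  let res_r := max (-32768) (min 32767 res_r)
  let res_i := max (-32768) (min 32767 res_i)
  (res_r, res_i)

-- the butterfly stage for a given m (the body of A's `for stage in range(1, n_bits+1)` loop);
-- list reads/writes use pyGetD/pySetD: Python raises out of range, Pre_ keeps every index in range
def stageA (tw_r tw_i : List Int) (n_points m : Int) (X0 : List Int × List Int) : List Int × List Int :=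
  let half_m : Int := m >>> (1 : Nat)
  let stride : Int := PySem.Int.floordiv n_points m
  (PySem.List.pyRange 0 n_points m).foldl (fun X k =>
    (PySem.List.pyRange 0 half_m 1).foldl (fun (X : List Int × List Int) j =>
      let tw_idx := j * stride
      let t_r := PySem.List.pyGetD tw_r tw_idx 0
      let t_i := PySem.List.pyGetD tw_i tw_idx 0
      let bot_r := PySem.List.pyGetD X.1 (k + j + half_m) 0
      let bot_i := PySem.List.pyGetD X.2 (k + j + half_m) 0
      let top_r := PySem.List.pyGetD X.1 (k + j) 0
      let top_i := PySem.List.pyGetD X.2 (k + j) 0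
      let mul := q15_complex_mul bot_r bot_i t_r t_i
      (PySem.List.pySetD (PySem.List.pySetD X.1 (k + j) ((top_r + mul.1) >>> (1 : Nat))) (k + j + half_m) ((top_r - mul.1) >>> (1 : Nat)),
       PySem.List.pySetD (PySem.List.pySetD X.2 (k + j) ((top_i + mul.2) >>> (1 : Nat))) (k + j + half_m) ((top_i - mul.2) >>> (1 : Nat)))) X) X0

def radix2_dit_fft_bittrue (x_r : List Int) (x_i : List Int) (tw_r : List Int) (tw_i : List Int) (n_points : Int) : List Int × List Int :=
  let n_bits : Int := 10
  -- X_r = [0] * n_points ; X_i = [0] * n_points  ([0]*n is empty for n ≤ 0)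
  let init : List Int × List Int := (List.replicate n_points.toNat 0, List.replicate n_points.toNat 0)
  -- bit-reversal loop
  let X1 := (PySem.List.pyRange 0 n_points 1).foldl (fun (X : List Int × List Int) i =>
    let rev_i := bit_reverse i n_bits
    (PySem.List.pySetD X.1 rev_i (PySem.List.pyGetD x_r i 0),
     PySem.List.pySetD X.2 rev_i (PySem.List.pyGetD x_i i 0))) init
  -- butterfly stages; m = 1 << stage (stage ≥ 1, so toNat is exact)
  (PySem.List.pyRange 1 (n_bits + 1) 1).foldl (fun X stage =>
    stageA tw_r tw_i n_points ((1 : Int) <<< stage.toNat) X) X1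

-- ===== PORT B =====

def q15_cmul (d t : Int × Int) : Int × Int :=
  let pr := d.1 * t.1 - d.2 * t.2
  let pi := d.1 * t.2 + d.2 * t.1
  let rr := pr >>> (15 : Nat)
  let ri := pi >>> (15 : Nat)
  (max (-32768) (min 32767 rr), max (-32768) (min 32767 ri))

-- pts[0::2] and pts[1::2]
def sliceEvens {α : Type} : List α → List α
  | [] => []
  | [a] => [a]
  | a :: _ :: t => a :: sliceEvens t

def sliceOdds {α : Type} : List α → List α
  | [] => []
  | [_] => []
  | _ :: b :: t => b :: sliceOdds t

theorem length_sliceEvens {α : Type} : (l : List α) → (sliceEvens l).length = (l.length + 1) / 2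
  | [] => by simp [sliceEvens]
  | [_] => by simp [sliceEvens]
  | _ :: _ :: t => by simp [sliceEvens, length_sliceEvens t]; omega

theorem length_sliceOdds {α : Type} : (l : List α) → (sliceOdds l).length = l.length / 2
  | [] => by simp [sliceOdds]
  | [_] => by simp [sliceOdds]
  | _ :: _ :: t => by simp [sliceOdds, length_sliceOdds t]; omega

def fftB (pts tw : List (Int × Int)) (n_points : Int) : List (Int × Int) :=
  if _h : pts.length ≤ 1 then pts
  else
    let evens := fftB (sliceEvens pts) tw n_points
    let odds := fftB (sliceOdds pts) tw n_points
    let m : Int := PySem.List.len pts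
    let half : Int := PySem.Int.floordiv m 2
    let stride : Int := PySem.Int.floordiv n_points m
    let tb := (PySem.List.pyRange 0 half 1).foldl (fun (s : List (Int × Int) × List (Int × Int)) j =>
      let mu := q15_cmul (PySem.List.pyGetD odds j (0, 0)) (PySem.List.pyGetD tw (j * stride) (0, 0))
      let e := PySem.List.pyGetD evens j (0, 0)
      (s.1 ++ [((e.1 + mu.1) >>> (1 : Nat), (e.2 + mu.2) >>> (1 : Nat))],
       s.2 ++ [((e.1 - mu.1) >>> (1 : Nat), (e.2 - mu.2) >>> (1 : Nat))])) ([], [])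
    tb.1 ++ tb.2
termination_by pts.length
decreasing_by
  · rw [length_sliceEvens]; omega
  · rw [length_sliceOdds]; omega

def radix2_dit_fft_bittrue_alt (x_r : List Int) (x_i : List Int) (tw_r : List Int) (tw_i : List Int) (n_points : Int) : List Int × List Int :=
  let pts := (PySem.List.pyRange 0 n_points 1).map
    (fun i => (PySem.List.pyGetD x_r i 0, PySem.List.pyGetD x_i i 0))
  let tw := tw_r.zip tw_i
  let out := fftB pts tw n_points
  (out.map Prod.fst, out.map Prod.snd)

-- ===== PRECONDITION & SPEC =====
-- A returns normally only for n_points ≤ 0 (all loops empty) or n_points a multiple of 1024 with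
-- long-enough inputs.  Pre_ keeps n_points ≤ 0 and the intended case n_points = 1024; it excludes the
-- larger multiples of 1024, on which A still returns but its hard-coded 10-bit reversal collides and
-- silently drops all but 1024 input samples — an artefact of the 1024-point model (B computes the
-- genuine n-point transform there).
def Pre_radix2_dit_fft_bittrue (x_r : List Int) (x_i : List Int) (tw_r : List Int) (tw_i : List Int) (n_points : Int) : Prop :=
  n_points ≤ 0 ∨
    (n_points = 1024 ∧ 1024 ≤ x_r.length ∧ 1024 ≤ x_i.length ∧ 512 ≤ tw_r.length ∧ 512 ≤ tw_i.length)
instance (x_r : List Int) (x_i : List Int) (tw_r : List Int) (tw_i : List Int) (n_points : Int) : Decidable (Pre_radix2_dit_fft_bittrue x_r x_i tw_r tw_i n_points) := by unfold Pre_radix2_dit_fft_bittrue; infer_instance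

def pvWitness_radix2_dit_fft_bittrue : List Int × List Int × List Int × List Int × Int := ([], [], [], [], 0)

def Spec_radix2_dit_fft_bittrue (x_r : List Int) (x_i : List Int) (tw_r : List Int) (tw_i : List Int) (n_points : Int) (out : List Int × List Int) : Prop := out = radix2_dit_fft_bittrue_alt x_r x_i tw_r tw_i n_points
instance (x_r : List Int) (x_i : List Int) (tw_r : List Int) (tw_i : List Int) (n_points : Int) (out : List Int × List Int) : Decidable (Spec_radix2_dit_fft_bittrue x_r x_i tw_r tw_i n_points out) := by unfold Spec_radix2_dit_fft_bittrue; infer_instance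

-- ===== CLAIM (what is proved, stated in full; the proofs are below) =====
def Claim_equal_radix2_dit_fft_bittrue : Prop := ∀ (x_r : List Int) (x_i : List Int) (tw_r : List Int) (tw_i : List Int) (n_points : Int), Dom_radix2_dit_fft_bittrue x_r x_i tw_r tw_i n_points → Pre_radix2_dit_fft_bittrue x_r x_i tw_r tw_i n_points → Spec_radix2_dit_fft_bittrue x_r x_i tw_r tw_i n_points (radix2_dit_fft_bittrue x_r x_i tw_r tw_i n_points)

-- ===== LEMMAS AND PROOFS =====

-- ---- the common functional model: one butterfly stage as an index map ----

-- the twiddle pair at a (nonnegative, in-range) index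
def twF (tw_r tw_i : List Int) (idx : Nat) : Int × Int := (tw_r.getD idx 0, tw_i.getD idx 0)

-- one size-m butterfly stage of the 1024-point transform, as a map on index functions
def TF (tw_r tw_i : List Int) (m : Nat) (h : Nat → Int × Int) (p : Nat) : Int × Int :=
  let half := m / 2
  let j := p % m
  if j < half then
    let t := twF tw_r tw_i (j * (1024 / m))
    let mu := q15_complex_mul (h (p + half)).1 (h (p + half)).2 t.1 t.2
    (((h p).1 + mu.1) >>> (1 : Nat), ((h p).2 + mu.2) >>> (1 : Nat))
  else
    let t := twF tw_r tw_i ((j - half) * (1024 / m))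
    let mu := q15_complex_mul (h p).1 (h p).2 t.1 t.2
    (((h (p - half)).1 - mu.1) >>> (1 : Nat), ((h (p - half)).2 - mu.2) >>> (1 : Nat))

-- stages 1..b composed
def RF (tw_r tw_i : List Int) : Nat → (Nat → Int × Int) → Nat → Int × Int
  | 0, h => h
  | b+1, h => TF tw_r tw_i (2 ^ (b + 1)) (RF tw_r tw_i b h)

def mapR (h : Nat → Int × Int) : List Int := (List.range 1024).map (fun p => (h p).1)
def mapI (h : Nat → Int × Int) : List Int := (List.range 1024).map (fun p => (h p).2)

-- ---- bit reversal on ℕ, mirroring A's loop ----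

def revAux : Nat → Nat → Nat → Nat
  | 0, r, _ => r
  | b+1, r, v => revAux b (2 * r + v % 2) (v / 2)

def revN (b v : Nat) : Nat := revAux b 0 v

theorem revAux_eq (b : Nat) : ∀ r v, revAux b r v = r * 2 ^ b + revN b v := by
  induction b with
  | zero => intro r v; simp [revAux, revN]
  | succ b ih =>
    intro r v
    rw [revAux, revN, revAux, ih, ih (2 * 0 + v % 2)]
    ring

theorem revN_succ (b v : Nat) : revN (b + 1) v = v % 2 * 2 ^ b + revN b (v / 2) := by
  rw [revN, revAux, revAux_eq]; ring

theorem revN_lt (b : Nat) : ∀ v, revN b v < 2 ^ b := by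
  induction b with
  | zero => intro v; simp [revN, revAux]
  | succ b ih =>
    intro v
    rw [revN_succ]
    have := ih (v / 2)
    have h2 : v % 2 ≤ 1 := by omega
    have : v % 2 * 2 ^ b ≤ 2 ^ b := by
      calc v % 2 * 2 ^ b ≤ 1 * 2 ^ b := Nat.mul_le_mul_right _ h2
      _ = 2 ^ b := by ring
    have hp : 2 ^ (b + 1) = 2 ^ b + 2 ^ b := by ring
    omega

theorem revN_msb (b : Nat) : ∀ v, v < 2 ^ (b + 1) →
    revN (b + 1) v = 2 * revN b (v % 2 ^ b) + v / 2 ^ b := by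
  induction b with
  | zero => intro v hv; interval_cases v <;> decide
  | succ b ih =>
    intro v hv
    rw [revN_succ, ih (v / 2) (by rw [pow_succ] at hv; omega)]
    have e1 : v / 2 % 2 ^ b = v % 2 ^ (b + 1) / 2 := by
      rw [pow_succ', Nat.mod_mul_right_div_self]
    have e2 : v / 2 / 2 ^ b = v / 2 ^ (b + 1) := by
      rw [Nat.div_div_eq_div_mul, pow_succ']
    have e3 : v % 2 ^ (b + 1) % 2 = v % 2 := by
      rw [pow_succ']; exact Nat.mod_mod_of_dvd v ⟨2 ^ b, rfl⟩
    rw [e1, e2, revN_succ, e3]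
    ring

theorem revN_double (b q : Nat) (h : q < 2 ^ b) : revN (b + 1) q = 2 * revN b q := by
  have hle : (2:Nat)^b ≤ 2^(b+1) := Nat.pow_le_pow_right (by omega) (by omega)
  rw [revN_msb b q (by omega), Nat.mod_eq_of_lt h, Nat.div_eq_of_lt h]
  omega

theorem revN_double_add (b q : Nat) (h : q < 2 ^ b) : revN (b + 1) (q + 2 ^ b) = 2 * revN b q + 1 := by
  have h2 : q + 2^b < 2^(b+1) := by
    have : (2:Nat)^(b+1) = 2^b + 2^b := by ring
    omega
  rw [revN_msb b _ h2]
  have hm : (q + 2^b) % 2^b = q := by rw [Nat.add_mod_right, Nat.mod_eq_of_lt h]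
  have hd : (q + 2^b) / 2^b = 1 := by
    rw [Nat.add_div_right _ (Nat.pow_pos (by omega)), Nat.div_eq_of_lt h]
  rw [hm, hd]

theorem revN_revN (b : Nat) : ∀ v, v < 2 ^ b → revN b (revN b v) = v := by
  induction b with
  | zero => intro v hv; interval_cases v; decide
  | succ b ih =>
    intro v hv
    have hv2 : v / 2 < 2 ^ b := by rw [pow_succ] at hv; omega
    have hr := revN_lt b (v / 2)
    have hin : revN (b+1) v = v % 2 * 2 ^ b + revN b (v / 2) := revN_succ b v
    rcases Nat.mod_two_eq_zero_or_one v with h0 | h1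
    · rw [hin, h0]
      simp only [Nat.zero_mul, Nat.zero_add]
      rw [revN_double b _ hr, ih _ hv2]
      omega
    · rw [hin, h1, Nat.one_mul]
      rw [show 2 ^ b + revN b (v / 2) = revN b (v / 2) + 2 ^ b from by omega]
      rw [revN_double_add b _ hr, ih _ hv2]
      omega

theorem revAux_snoc (b : Nat) : ∀ r v, revAux (b + 1) r v = 2 * revAux b r v + v / 2 ^ b % 2 := by
  induction b with
  | zero => intro r v; simp [revAux]
  | succ b ih =>
    intro r v
    rw [revAux, ih, revAux]
    have : v / 2 / 2 ^ b = v / 2 ^ (b + 1) := by rw [Nat.div_div_eq_div_mul, pow_succ']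
    rw [this]

theorem bit_reverse_fold (b : Nat) : ∀ r v : Nat,
    ((PySem.List.pyRange 0 (b : Int) 1).foldl
      (fun (s : Int × Int) _ => (s.1 * 2 + PySem.Int.mod s.2 2, PySem.Int.floordiv s.2 2))
      ((r : Int), (v : Int))) = ((revAux b r v : Int), ((v / 2 ^ b : Nat) : Int)) := by
  induction b with
  | zero => intro r v; simp [PySem.List.pyRange_one_eq_nil, revAux]
  | succ b ih =>
    intro r v
    rw [show ((b + 1 : Nat) : Int) = (b : Int) + 1 from by push_cast; ring,
      PySem.List.pyRange_one_succ_right (by positivity), List.foldl_append, ih]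
    simp only [List.foldl_cons, List.foldl_nil]
    have h1 : PySem.Int.mod ((v / 2 ^ b : Nat) : Int) 2 = ((v / 2 ^ b % 2 : Nat) : Int) := by
      exact_mod_cast PySem.Int.mod_natCast (v / 2 ^ b) 2
    have h2 : PySem.Int.floordiv ((v / 2 ^ b : Nat) : Int) 2 = ((v / 2 ^ b / 2 : Nat) : Int) := by
      exact_mod_cast PySem.Int.floordiv_natCast (v / 2 ^ b) 2
    rw [h1, h2, revAux_snoc]
    have h3 : v / 2 ^ b / 2 = v / 2 ^ (b + 1) := by rw [Nat.div_div_eq_div_mul, pow_succ]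
    rw [h3, Prod.mk.injEq]
    exact ⟨by push_cast; ring, rfl⟩

theorem bit_reverse_natCast (b k : Nat) : bit_reverse (k : Int) (b : Int) = (revN b k : Int) := by
  rw [bit_reverse, show ((0:Int),(k:Int)) = (((0:Nat):Int),((k:Nat):Int)) from by norm_num,
    bit_reverse_fold, revN]

-- ---- small bridges ----

theorem pySetD_natCast {α : Type} (xs : List α) (n : Nat) (v : α) (h : n < xs.length) :
    PySem.List.pySetD xs (n : Int) v = xs.set n v := by
  simp [PySem.List.pySetD, PySem.List.pySet?, PySem.List.pyIdx?, h]

theorem set_map_range {α : Type} (N q : Nat) (f : Nat → α) (a : α) :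
    ((List.range N).map f).set q a = (List.range N).map (fun p => if p = q then a else f p) := by
  apply List.ext_getElem <;> simp [List.getElem_set]
  intro i hi
  split
  · simp_all
  · simp_all [Ne.symm]

theorem zip_getD (tw_r tw_i : List Int) (idx : Nat) (h1 : idx < tw_r.length) (h2 : idx < tw_i.length) :
    (tw_r.zip tw_i).getD idx (0, 0) = twF tw_r tw_i idx := by
  have hlen : idx < (tw_r.zip tw_i).length := by simp [List.length_zip]; omega
  rw [List.getD_eq_getElem _ _ hlen, List.getElem_zip, twF,
    List.getD_eq_getElem _ _ h1, List.getD_eq_getElem _ _ h2]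


-- ---- A's bit-reversal write loop ----

theorem replicate_eq_map_range {α : Type} (N : Nat) (c : α) :
    List.replicate N c = (List.range N).map (fun _ => c) := by
  simp

theorem setrev_loop (xs : List Int) :
    ∀ K, K ≤ 1024 →
      (List.range K).foldl
        (fun X (k : Nat) => PySem.List.pySetD X (bit_reverse (k : Int) 10) (PySem.List.pyGetD xs (k : Int) 0))
        ((List.range 1024).map (fun _ => (0 : Int)))
      = (List.range 1024).map (fun p => if revN 10 p < K then xs.getD (revN 10 p) 0 else 0) := by
  intro K
  induction K with
  | zero =>
    intro _
    simp only [List.range_zero, List.foldl_nil]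
    apply List.map_congr_left
    intro p _
    simp
  | succ K ih =>
    intro hK
    rw [show List.range (K + 1) = List.range K ++ [K] from List.range_succ,
      List.foldl_append, ih (by omega)]
    simp only [List.foldl_cons, List.foldl_nil]
    have hrevlt : revN 10 K < 1024 := revN_lt 10 K
    rw [show (10 : Int) = ((10 : Nat) : Int) from by norm_num, bit_reverse_natCast,
      PySem.List.pyGetD_natCast,
      pySetD_natCast _ _ _ (by simp; omega), set_map_range]
    apply List.map_congr_left
    intro p hp
    simp only [List.mem_range] at hp
    by_cases hpk : p = revN 10 K
    · subst hpk
      rw [if_pos rfl, if_pos (by rw [revN_revN 10 K (by omega)]; omega),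
        revN_revN 10 K (by omega)]
    · rw [if_neg hpk]
      have hne : revN 10 p ≠ K := by
        intro hc
        exact hpk (by rw [← hc, revN_revN 10 p (by omega)])
      by_cases hlt : revN 10 p < K
      · rw [if_pos hlt, if_pos (by omega)]
      · rw [if_neg hlt, if_neg (by omega)]

-- ---- A's butterfly stage loops ----

-- the inner-loop body of stageA, named so the loop inductions can quote it
def ibody (tw_r tw_i : List Int) (half_m stride k : Int) (X : List Int × List Int) (j : Int) : List Int × List Int :=
  let tw_idx := j * stride
  let t_r := PySem.List.pyGetD tw_r tw_idx 0
  let t_i := PySem.List.pyGetD tw_i tw_idx 0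
  let bot_r := PySem.List.pyGetD X.1 (k + j + half_m) 0
  let bot_i := PySem.List.pyGetD X.2 (k + j + half_m) 0
  let top_r := PySem.List.pyGetD X.1 (k + j) 0
  let top_i := PySem.List.pyGetD X.2 (k + j) 0
  let mul := q15_complex_mul bot_r bot_i t_r t_i
  (PySem.List.pySetD (PySem.List.pySetD X.1 (k + j) ((top_r + mul.1) >>> (1 : Nat))) (k + j + half_m) ((top_r - mul.1) >>> (1 : Nat)),
   PySem.List.pySetD (PySem.List.pySetD X.2 (k + j) ((top_i + mul.2) >>> (1 : Nat))) (k + j + half_m) ((top_i - mul.2) >>> (1 : Nat)))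

theorem stageA_ibody (tw_r tw_i : List Int) (n m : Int) (X0 : List Int × List Int) :
    stageA tw_r tw_i n m X0 =
      (PySem.List.pyRange 0 n m).foldl (fun X k =>
        (PySem.List.pyRange 0 (m >>> (1 : Nat)) 1).foldl
          (ibody tw_r tw_i (m >>> (1 : Nat)) (PySem.Int.floordiv n m) k) X) X0 := rfl

-- the state of the inner loop after J butterflies of block t at stage s
def hyb (tw_r tw_i : List Int) (g f : Nat → Int × Int) (s t J p : Nat) : Int × Int :=
  if (t * 2 ^ s ≤ p ∧ p < t * 2 ^ s + J) ∨
     (t * 2 ^ s + 2 ^ (s - 1) ≤ p ∧ p < t * 2 ^ s + 2 ^ (s - 1) + J)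
  then TF tw_r tw_i (2 ^ s) f p else g p

theorem jloop (tw_r tw_i : List Int)
    (s : Nat) (hs1 : 1 ≤ s) (hs10 : s ≤ 10) (f g : Nat → Int × Int) (t : Nat)
    (ht : (t + 1) * 2 ^ s ≤ 1024)
    (hag : ∀ q, t * 2 ^ s ≤ q → q < (t + 1) * 2 ^ s → g q = f q) :
    ∀ J, J ≤ 2 ^ (s - 1) →
      (List.range J).foldl
        (fun X (jn : Nat) =>
          ibody tw_r tw_i ((2 ^ (s - 1) : Nat) : Int) ((2 ^ (10 - s) : Nat) : Int) ((t * 2 ^ s : Nat) : Int) X (jn : Int))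
        (mapR g, mapI g)
      = (mapR (hyb tw_r tw_i g f s t J), mapI (hyb tw_r tw_i g f s t J)) := by
  have hP2 : 2 ^ s = 2 * 2 ^ (s - 1) := by
    conv_lhs => rw [show s = (s - 1) + 1 from by omega]
    ring
  have hPD : 2 ^ (s - 1) * 2 ^ (10 - s) = 512 := by
    rw [← pow_add, show s - 1 + (10 - s) = 9 from by omega]
    norm_num
  have ht' : t * 2 ^ s + 2 ^ s ≤ 1024 := by
    have e : (t + 1) * 2 ^ s = t * 2 ^ s + 2 ^ s := by ring
    omega
  have hdiv : 1024 / 2 ^ s = 2 ^ (10 - s) := by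
    have h10 : (1024 : Nat) = 2 ^ s * 2 ^ (10 - s) := by
      rw [← pow_add, show s + (10 - s) = 10 from by omega]
      norm_num
    rw [h10, Nat.mul_div_cancel_left _ (Nat.pow_pos (by omega))]
  have hhalf : 2 ^ s / 2 = 2 ^ (s - 1) := by omega
  intro J
  induction J with
  | zero =>
    intro _
    simp only [List.range_zero, List.foldl_nil, mapR, mapI]
    rw [Prod.mk.injEq]
    constructor <;>
      · apply List.map_congr_left
        intro p _
        rw [hyb, if_neg (show ¬ ((t * 2 ^ s ≤ p ∧ p < t * 2 ^ s + 0) ∨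
          (t * 2 ^ s + 2 ^ (s - 1) ≤ p ∧ p < t * 2 ^ s + 2 ^ (s - 1) + 0)) from by omega)]
  | succ J ih =>
    intro hJ1
    have hJP : J < 2 ^ (s - 1) := by omega
    have hb1 : t * 2 ^ s + J < 1024 := by omega
    have hb2 : t * 2 ^ s + J + 2 ^ (s - 1) < 1024 := by omega
    have htw : J * 2 ^ (10 - s) < 512 := by
      have hm : J * 2 ^ (10 - s) < 2 ^ (s - 1) * 2 ^ (10 - s) :=
        (Nat.mul_lt_mul_right (Nat.pow_pos (show 0 < 2 by omega))).mpr hJP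
      omega
    rw [show List.range (J + 1) = List.range J ++ [J] from List.range_succ,
      List.foldl_append, ih (by omega)]
    simp only [List.foldl_cons, List.foldl_nil]
    set h := hyb tw_r tw_i g f s t J with hh
    -- the two reads of this butterfly hit indices the previous butterflies never wrote
    have hread1 : h (t * 2 ^ s + J) = f (t * 2 ^ s + J) := by
      rw [hh, hyb, if_neg (by omega)]
      exact hag _ (by omega) (by have e : (t + 1) * 2 ^ s = t * 2 ^ s + 2 ^ s := by ring
                                 omega)
    have hread2 : h (t * 2 ^ s + J + 2 ^ (s - 1)) = f (t * 2 ^ s + J + 2 ^ (s - 1)) := by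
      rw [hh, hyb, if_neg (by omega)]
      exact hag _ (by omega) (by have e : (t + 1) * 2 ^ s = t * 2 ^ s + 2 ^ s := by ring
                                 omega)
    simp only [ibody, mapR, mapI]
    rw [show ((t * 2 ^ s : Nat) : Int) + (J : Int) + ((2 ^ (s - 1) : Nat) : Int) = ((t * 2 ^ s + J + 2 ^ (s - 1) : Nat) : Int) from by push_cast; ring]
    rw [show ((t * 2 ^ s : Nat) : Int) + (J : Int) = ((t * 2 ^ s + J : Nat) : Int) from by push_cast; ring]
    rw [show (J : Int) * ((2 ^ (10 - s) : Nat) : Int) = ((J * 2 ^ (10 - s) : Nat) : Int) from by push_cast; ring]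
    simp only [PySem.List.pyGetD_natCast]
    rw [PySem.List.getD_map_range _ _ _ _ hb1, PySem.List.getD_map_range _ _ _ _ hb2,
      PySem.List.getD_map_range (fun p => (h p).2) _ _ _ hb1,
      PySem.List.getD_map_range (fun p => (h p).2) _ _ _ hb2]
    rw [pySetD_natCast (List.map (fun p => (h p).1) (List.range 1024)) _ _ (by simp; omega),
      set_map_range,
      pySetD_natCast (List.map (fun p => (h p).2) (List.range 1024)) _ _ (by simp; omega),
      set_map_range]
    rw [pySetD_natCast _ _ _ (by simp; omega), set_map_range,
      pySetD_natCast _ _ _ (by simp; omega), set_map_range]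
    rw [hread1, hread2, Prod.mk.injEq]
    have key : ∀ p, p < 1024 →
        (if p = t * 2 ^ s + J + 2 ^ (s - 1)
          then (((f (t * 2 ^ s + J)).1 - (q15_complex_mul (f (t * 2 ^ s + J + 2 ^ (s - 1))).1 (f (t * 2 ^ s + J + 2 ^ (s - 1))).2 (tw_r.getD (J * 2 ^ (10 - s)) 0) (tw_i.getD (J * 2 ^ (10 - s)) 0)).1) >>> (1 : Nat),
                ((f (t * 2 ^ s + J)).2 - (q15_complex_mul (f (t * 2 ^ s + J + 2 ^ (s - 1))).1 (f (t * 2 ^ s + J + 2 ^ (s - 1))).2 (tw_r.getD (J * 2 ^ (10 - s)) 0) (tw_i.getD (J * 2 ^ (10 - s)) 0)).2) >>> (1 : Nat))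
          else if p = t * 2 ^ s + J
          then (((f (t * 2 ^ s + J)).1 + (q15_complex_mul (f (t * 2 ^ s + J + 2 ^ (s - 1))).1 (f (t * 2 ^ s + J + 2 ^ (s - 1))).2 (tw_r.getD (J * 2 ^ (10 - s)) 0) (tw_i.getD (J * 2 ^ (10 - s)) 0)).1) >>> (1 : Nat),
                ((f (t * 2 ^ s + J)).2 + (q15_complex_mul (f (t * 2 ^ s + J + 2 ^ (s - 1))).1 (f (t * 2 ^ s + J + 2 ^ (s - 1))).2 (tw_r.getD (J * 2 ^ (10 - s)) 0) (tw_i.getD (J * 2 ^ (10 - s)) 0)).2) >>> (1 : Nat))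
          else h p)
        = hyb tw_r tw_i g f s t (J + 1) p := by
      intro p hp
      by_cases hc2 : p = t * 2 ^ s + J + 2 ^ (s - 1)
      · rw [if_pos hc2, hyb, if_pos (by omega)]
        rw [TF]
        simp only
        have hmod : p % 2 ^ s = J + 2 ^ (s - 1) := by
          rw [hc2, show t * 2 ^ s + J + 2 ^ (s - 1) = 2 ^ s * t + (J + 2 ^ (s - 1)) from by ring,
            Nat.mul_add_mod, Nat.mod_eq_of_lt (by omega)]
        rw [hmod, hhalf, if_neg (by omega), hdiv]
        rw [show J + 2 ^ (s - 1) - 2 ^ (s - 1) = J from by omega]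
        rw [show p - 2 ^ (s - 1) = t * 2 ^ s + J from by omega, hc2]
        rfl
      · rw [if_neg hc2]
        by_cases hc1 : p = t * 2 ^ s + J
        · rw [if_pos hc1, hyb, if_pos (by omega)]
          rw [TF]
          simp only
          have hmod : p % 2 ^ s = J := by
            rw [hc1, show t * 2 ^ s + J = 2 ^ s * t + J from by ring,
              Nat.mul_add_mod, Nat.mod_eq_of_lt (by omega)]
          rw [hmod, hhalf, if_pos (by omega), hdiv]
          rw [show p + 2 ^ (s - 1) = t * 2 ^ s + J + 2 ^ (s - 1) from by omega, hc1]
          rfl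
        · rw [if_neg hc1, hh, hyb, hyb]
          by_cases hin : (t * 2 ^ s ≤ p ∧ p < t * 2 ^ s + J) ∨
              (t * 2 ^ s + 2 ^ (s - 1) ≤ p ∧ p < t * 2 ^ s + 2 ^ (s - 1) + J)
          · rw [if_pos hin, if_pos (show (t * 2 ^ s ≤ p ∧ p < t * 2 ^ s + (J + 1)) ∨
              (t * 2 ^ s + 2 ^ (s - 1) ≤ p ∧ p < t * 2 ^ s + 2 ^ (s - 1) + (J + 1)) from by omega)]
          · rw [if_neg hin, if_neg (show ¬ ((t * 2 ^ s ≤ p ∧ p < t * 2 ^ s + (J + 1)) ∨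
              (t * 2 ^ s + 2 ^ (s - 1) ≤ p ∧ p < t * 2 ^ s + 2 ^ (s - 1) + (J + 1))) from by omega)]
    constructor <;>
      · apply List.map_congr_left
        intro p hp
        simp only [List.mem_range] at hp
        rw [← key p hp]
        split <;> [rfl; skip]
        split <;> rfl


-- the state of stage s after the first T blocks
def fT (tw_r tw_i : List Int) (f : Nat → Int × Int) (s T p : Nat) : Int × Int :=
  if p < T * 2 ^ s then TF tw_r tw_i (2 ^ s) f p else f p

theorem kloop (tw_r tw_i : List Int) (s : Nat) (hs1 : 1 ≤ s) (hs10 : s ≤ 10) (f : Nat → Int × Int) :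
    ∀ T, T ≤ 2 ^ (10 - s) →
      (List.range T).foldl
        (fun X (tn : Nat) =>
          (List.range (2 ^ (s - 1))).foldl
            (fun Y (jn : Nat) =>
              ibody tw_r tw_i ((2 ^ (s - 1) : Nat) : Int) ((2 ^ (10 - s) : Nat) : Int) ((tn * 2 ^ s : Nat) : Int) Y (jn : Int)) X)
        (mapR f, mapI f)
      = (mapR (fT tw_r tw_i f s T), mapI (fT tw_r tw_i f s T)) := by
  intro T
  induction T with
  | zero =>
    intro _
    simp only [List.range_zero, List.foldl_nil, mapR, mapI]
    rw [Prod.mk.injEq]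
    constructor <;>
      · apply List.map_congr_left
        intro p _
        rw [fT, if_neg (show ¬ p < 0 * 2 ^ s from by omega)]
  | succ T ih =>
    intro hT
    have hSD : 2 ^ s * 2 ^ (10 - s) = 1024 := by
      rw [← pow_add, show s + (10 - s) = 10 from by omega]
      norm_num
    have hblk : (T + 1) * 2 ^ s ≤ 1024 := by
      calc (T + 1) * 2 ^ s ≤ 2 ^ (10 - s) * 2 ^ s :=
            Nat.mul_le_mul_right _ hT
        _ = 1024 := by rw [Nat.mul_comm]; exact hSD
    rw [show List.range (T + 1) = List.range T ++ [T] from List.range_succ,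
      List.foldl_append, ih (by omega)]
    simp only [List.foldl_cons, List.foldl_nil]
    have hagree : ∀ q, T * 2 ^ s ≤ q → q < (T + 1) * 2 ^ s → fT tw_r tw_i f s T q = f q := by
      intro q hq _
      rw [fT, if_neg (show ¬ q < T * 2 ^ s from by omega)]
    rw [jloop tw_r tw_i s hs1 hs10 f (fT tw_r tw_i f s T) T hblk hagree (2 ^ (s - 1)) (le_refl _)]
    have hP2 : 2 ^ s = 2 * 2 ^ (s - 1) := by
      conv_lhs => rw [show s = (s - 1) + 1 from by omega]
      ring
    have eTT : (T + 1) * 2 ^ s = T * 2 ^ s + 2 ^ s := by ring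
    rw [Prod.mk.injEq]
    simp only [mapR, mapI]
    constructor <;>
      · apply List.map_congr_left
        intro p _
        rw [hyb, fT]
        by_cases hin : (T * 2 ^ s ≤ p ∧ p < T * 2 ^ s + 2 ^ (s - 1)) ∨
            (T * 2 ^ s + 2 ^ (s - 1) ≤ p ∧ p < T * 2 ^ s + 2 ^ (s - 1) + 2 ^ (s - 1))
        · rw [if_pos hin, fT, if_pos (show p < (T + 1) * 2 ^ s from by omega)]
        · rw [if_neg hin, fT]
          by_cases hlt : p < T * 2 ^ s
          · rw [if_pos hlt, if_pos (show p < (T + 1) * 2 ^ s from by omega)]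
          · rw [if_neg hlt, if_neg (show ¬ p < (T + 1) * 2 ^ s from by omega)]

theorem stage_eq (tw_r tw_i : List Int) (s : Nat) (hs1 : 1 ≤ s) (hs10 : s ≤ 10) (f : Nat → Int × Int) :
    stageA tw_r tw_i 1024 ((2 ^ s : Nat) : Int) (mapR f, mapI f)
      = (mapR (TF tw_r tw_i (2 ^ s) f), mapI (TF tw_r tw_i (2 ^ s) f)) := by
  have hP2 : (2 : Nat) ^ s = 2 * 2 ^ (s - 1) := by
    conv_lhs => rw [show s = (s - 1) + 1 from by omega]
    ring
  have hSD : 2 ^ s * 2 ^ (10 - s) = 1024 := by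
    rw [← pow_add, show s + (10 - s) = 10 from by omega]
    norm_num
  have hdiv : 1024 / 2 ^ s = 2 ^ (10 - s) := by
    rw [← hSD, Nat.mul_div_cancel_left _ (Nat.pow_pos (by omega))]
  have hhalf : ((2 ^ s : Nat) : Int) >>> (1 : Nat) = ((2 ^ (s - 1) : Nat) : Int) := by
    rw [Int.shiftRight_eq_div_pow]
    omega
  have hstride : PySem.Int.floordiv 1024 ((2 ^ s : Nat) : Int) = ((2 ^ (10 - s) : Nat) : Int) := by
    rw [show (1024 : Int) = ((1024 : Nat) : Int) from by norm_num, ← hdiv]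
    exact_mod_cast PySem.Int.floordiv_natCast 1024 (2 ^ s)
  have h2s1 : (1 : Nat) ≤ 2 ^ s := Nat.one_le_two_pow
  have hcount : (((1024 : Int) - 0 + ((2 ^ s : Nat) : Int) - 1) / ((2 ^ s : Nat) : Int)).toNat = 2 ^ (10 - s) := by
    have h1 : ((1024 : Int) - 0 + ((2 ^ s : Nat) : Int) - 1) = ((1024 + 2 ^ s - 1 : Nat) : Int) := by
      omega
    have h2 : ((1024 + 2 ^ s - 1 : Nat) : Int) / ((2 ^ s : Nat) : Int) = (((1024 + 2 ^ s - 1) / 2 ^ s : Nat) : Int) := by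
      rw [Int.natCast_div]
    have h3 : (1024 + 2 ^ s - 1) / 2 ^ s = 2 ^ (10 - s) := by
      rw [show 1024 + 2 ^ s - 1 = 2 ^ s * 2 ^ (10 - s) + (2 ^ s - 1) from by omega,
        Nat.mul_add_div (Nat.pow_pos (by omega)), Nat.div_eq_of_lt (by omega), Nat.add_zero]
    rw [h1, h2, h3, Int.toNat_natCast]
  rw [stageA_ibody, hhalf, hstride,
    PySem.List.pyRange_of_pos 0 1024 (show (0 : Int) < ((2 ^ s : Nat) : Int) from by positivity),
    if_pos (show (0 : Int) < 1024 from by norm_num), hcount, List.foldl_map]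
  have hbody : ∀ (X : List Int × List Int) (tn : Nat), tn ∈ List.range (2 ^ (10 - s)) →
      (PySem.List.pyRange 0 ((2 ^ (s - 1) : Nat) : Int) 1).foldl
        (ibody tw_r tw_i ((2 ^ (s - 1) : Nat) : Int) ((2 ^ (10 - s) : Nat) : Int) (0 + ((2 ^ s : Nat) : Int) * (tn : Int))) X
      = (List.range (2 ^ (s - 1))).foldl
        (fun Y (jn : Nat) =>
          ibody tw_r tw_i ((2 ^ (s - 1) : Nat) : Int) ((2 ^ (10 - s) : Nat) : Int) ((tn * 2 ^ s : Nat) : Int) Y (jn : Int)) X := by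
    intro X tn _
    rw [PySem.List.pyRange_one]
    simp only [Int.sub_zero, Int.toNat_natCast]
    rw [List.foldl_map,
      show (0 + ((2 ^ s : Nat) : Int) * (tn : Int)) = ((tn * 2 ^ s : Nat) : Int) from by push_cast; ring]
    apply PySem.List.foldl_congr_mem
    intro acc x _
    rw [zero_add]
  refine Eq.trans (PySem.List.foldl_congr_mem _ _ _ _ hbody) ?_
  rw [kloop tw_r tw_i s hs1 hs10 f (2 ^ (10 - s)) (le_refl _), Prod.mk.injEq]
  simp only [mapR, mapI]
  constructor <;>
    · apply List.map_congr_left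
      intro p hp
      simp only [List.mem_range] at hp
      rw [fT, if_pos (show p < 2 ^ (10 - s) * 2 ^ s from by rw [Nat.mul_comm]; omega)]


-- ---- B's recursion ----

theorem q15_cmul_eq (d t : Int × Int) : q15_cmul d t = q15_complex_mul d.1 d.2 t.1 t.2 := rfl

theorem sliceEvens_map_range {α : Type} : ∀ (n : Nat) (g : Nat → α),
    sliceEvens ((List.range (2 * n)).map g) = (List.range n).map (fun k => g (2 * k)) := by
  intro n
  induction n with
  | zero => intro g; simp [sliceEvens]
  | succ n ih =>
    intro g
    rw [show 2 * (n + 1) = 2 * n + 1 + 1 from by ring, List.range_succ_eq_map, List.range_succ_eq_map]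
    simp only [List.map_cons, List.map_map]
    rw [sliceEvens, show ((List.range (2 * n)).map (g ∘ Nat.succ ∘ Nat.succ)) = ((List.range (2 * n)).map (fun k => g (k + 2))) from by
      apply List.map_congr_left; intro k _; simp [Function.comp], ih]
    rw [List.range_succ_eq_map]
    simp only [List.map_cons, List.map_map]
    congr 1

theorem sliceOdds_map_range {α : Type} : ∀ (n : Nat) (g : Nat → α),
    sliceOdds ((List.range (2 * n)).map g) = (List.range n).map (fun k => g (2 * k + 1)) := by
  intro n
  induction n with
  | zero => intro g; simp [sliceOdds]
  | succ n ih =>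
    intro g
    rw [show 2 * (n + 1) = 2 * n + 1 + 1 from by ring, List.range_succ_eq_map, List.range_succ_eq_map]
    simp only [List.map_cons, List.map_map]
    rw [sliceOdds, show ((List.range (2 * n)).map (g ∘ Nat.succ ∘ Nat.succ)) = ((List.range (2 * n)).map (fun k => g (k + 2))) from by
      apply List.map_congr_left; intro k _; simp [Function.comp], ih]
    rw [List.range_succ_eq_map]
    simp only [List.map_cons, List.map_map]
    congr 1

theorem RF_shift (tw_r tw_i : List Int) : ∀ (b : Nat) (h h' : Nat → Int × Int) (c c' : Nat),
    (∀ q, q < 2 ^ b → h (q + c * 2 ^ b) = h' (q + c' * 2 ^ b)) →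
    ∀ p, p < 2 ^ b → RF tw_r tw_i b h (p + c * 2 ^ b) = RF tw_r tw_i b h' (p + c' * 2 ^ b) := by
  intro b
  induction b with
  | zero =>
    intro h h' c c' hag p hp
    have hp0 : p = 0 := by omega
    subst hp0
    exact hag 0 (by omega)
  | succ b ih =>
    intro h h' c c' hag p hp
    have hP2 : (2 : Nat) ^ (b + 1) = 2 * 2 ^ b := by ring
    have hhalf : (2 : Nat) ^ (b + 1) / 2 = 2 ^ b := by omega
    have hmodc : ∀ c0 : Nat, (p + c0 * 2 ^ (b + 1)) % 2 ^ (b + 1) = p := by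
      intro c0
      rw [Nat.add_mul_mod_self_right, Nat.mod_eq_of_lt hp]
    simp only [RF, TF]
    rw [hmodc c, hmodc c', hhalf]
    by_cases htop : p < 2 ^ b
    · rw [if_pos htop, if_pos htop]
      have e1 : RF tw_r tw_i b h (p + c * 2 ^ (b + 1) + 2 ^ b) = RF tw_r tw_i b h' (p + c' * 2 ^ (b + 1) + 2 ^ b) := by
        rw [show p + c * 2 ^ (b + 1) + 2 ^ b = p + (2 * c + 1) * 2 ^ b from by ring,
          show p + c' * 2 ^ (b + 1) + 2 ^ b = p + (2 * c' + 1) * 2 ^ b from by ring]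
        refine ih h h' (2 * c + 1) (2 * c' + 1) ?_ p htop
        intro q hq
        rw [show q + (2 * c + 1) * 2 ^ b = (q + 2 ^ b) + c * 2 ^ (b + 1) from by ring,
          show q + (2 * c' + 1) * 2 ^ b = (q + 2 ^ b) + c' * 2 ^ (b + 1) from by ring]
        exact hag _ (by omega)
      have e2 : RF tw_r tw_i b h (p + c * 2 ^ (b + 1)) = RF tw_r tw_i b h' (p + c' * 2 ^ (b + 1)) := by
        rw [show p + c * 2 ^ (b + 1) = p + 2 * c * 2 ^ b from by ring,
          show p + c' * 2 ^ (b + 1) = p + 2 * c' * 2 ^ b from by ring]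
        refine ih h h' (2 * c) (2 * c') ?_ p htop
        intro q hq
        rw [show q + 2 * c * 2 ^ b = q + c * 2 ^ (b + 1) from by ring,
          show q + 2 * c' * 2 ^ b = q + c' * 2 ^ (b + 1) from by ring]
        exact hag _ (by omega)
      rw [e1, e2]
    · rw [if_neg htop, if_neg htop]
      have hr : p - 2 ^ b < 2 ^ b := by omega
      have e1 : RF tw_r tw_i b h (p + c * 2 ^ (b + 1)) = RF tw_r tw_i b h' (p + c' * 2 ^ (b + 1)) := by
        rw [show p + c * 2 ^ (b + 1) = (p - 2 ^ b) + (2 * c + 1) * 2 ^ b from by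
            have : 2 ^ b ≤ p := by omega
            ring_nf
            omega,
          show p + c' * 2 ^ (b + 1) = (p - 2 ^ b) + (2 * c' + 1) * 2 ^ b from by
            have : 2 ^ b ≤ p := by omega
            ring_nf
            omega]
        refine ih h h' (2 * c + 1) (2 * c' + 1) ?_ _ hr
        intro q hq
        rw [show q + (2 * c + 1) * 2 ^ b = (q + 2 ^ b) + c * 2 ^ (b + 1) from by ring,
          show q + (2 * c' + 1) * 2 ^ b = (q + 2 ^ b) + c' * 2 ^ (b + 1) from by ring]
        exact hag _ (by omega)
      have e2 : RF tw_r tw_i b h (p + c * 2 ^ (b + 1) - 2 ^ b) = RF tw_r tw_i b h' (p + c' * 2 ^ (b + 1) - 2 ^ b) := by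
        rw [show p + c * 2 ^ (b + 1) - 2 ^ b = (p - 2 ^ b) + 2 * c * 2 ^ b from by
            have : 2 ^ b ≤ p := by omega
            ring_nf
            omega,
          show p + c' * 2 ^ (b + 1) - 2 ^ b = (p - 2 ^ b) + 2 * c' * 2 ^ b from by
            have : 2 ^ b ≤ p := by omega
            ring_nf
            omega]
        refine ih h h' (2 * c) (2 * c') ?_ _ hr
        intro q hq
        rw [show q + 2 * c * 2 ^ b = q + c * 2 ^ (b + 1) from by ring,
          show q + 2 * c' * 2 ^ b = q + c' * 2 ^ (b + 1) from by ring]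
        exact hag _ (by omega)
      rw [e1, e2]



theorem foldl_pair_append {α β : Type} (TOPF BOTF : β → α) (l : List β) (a b : List α) :
    l.foldl (fun (x : List α × List α) y => (x.1 ++ [TOPF y], x.2 ++ [BOTF y])) (a, b)
      = (a ++ l.map TOPF, b ++ l.map BOTF) := by
  rw [PySem.List.foldl_prod_mk (f := fun x y => x ++ [TOPF y]) (g := fun x y => x ++ [BOTF y]),
    PySem.List.foldl_append_singleton_eq_map, PySem.List.foldl_append_singleton_eq_map]

theorem fftB_eq (tw_r tw_i : List Int) (htr : 512 ≤ tw_r.length) (hti : 512 ≤ tw_i.length) :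
    ∀ b, b ≤ 10 → ∀ g : Nat → Int × Int,
      fftB ((List.range (2 ^ b)).map g) (tw_r.zip tw_i) 1024
        = (List.range (2 ^ b)).map (fun p => RF tw_r tw_i b (fun q => g (revN b q)) p) := by
  intro b
  induction b with
  | zero =>
    intro _ g
    simp [fftB, RF, revN, revAux]
  | succ b ih =>
    intro hb g
    have hP2 : (2 : Nat) ^ (b + 1) = 2 * 2 ^ b := by ring
    have h2b1 : (1 : Nat) ≤ 2 ^ b := Nat.one_le_two_pow
    have hlen : ((List.range (2 ^ (b + 1))).map g).length = 2 ^ (b + 1) := by simp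
    rw [fftB]
    rw [dif_neg (by rw [hlen]; omega)]
    have hE : sliceEvens ((List.range (2 ^ (b + 1))).map g) = (List.range (2 ^ b)).map (fun k => g (2 * k)) := by
      rw [hP2, sliceEvens_map_range]
    have hO : sliceOdds ((List.range (2 ^ (b + 1))).map g) = (List.range (2 ^ b)).map (fun k => g (2 * k + 1)) := by
      rw [hP2, sliceOdds_map_range]
    rw [hE, hO, ih (by omega) (fun k => g (2 * k)), ih (by omega) (fun k => g (2 * k + 1))]
    have hlenI : PySem.List.len ((List.range (2 ^ (b + 1))).map g) = ((2 ^ (b + 1) : Nat) : Int) := by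
      rw [PySem.List.len_eq, hlen]
    rw [hlenI]
    dsimp only
    have hhalfI : PySem.Int.floordiv ((2 ^ (b + 1) : Nat) : Int) 2 = ((2 ^ b : Nat) : Int) := by
      have : (2 : Nat) ^ (b + 1) / 2 = 2 ^ b := by omega
      rw [← this]
      exact_mod_cast PySem.Int.floordiv_natCast (2 ^ (b + 1)) 2
    have hdivN : 1024 / 2 ^ (b + 1) = 2 ^ (10 - (b + 1)) := by
      have hSD : 2 ^ (b + 1) * 2 ^ (10 - (b + 1)) = 1024 := by
        rw [← pow_add, show b + 1 + (10 - (b + 1)) = 10 from by omega]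
        norm_num
      rw [← hSD, Nat.mul_div_cancel_left _ (Nat.pow_pos (by omega))]
    have hstrideI : PySem.Int.floordiv 1024 ((2 ^ (b + 1) : Nat) : Int) = ((2 ^ (10 - (b + 1)) : Nat) : Int) := by
      rw [show (1024 : Int) = ((1024 : Nat) : Int) from by norm_num, ← hdivN]
      exact_mod_cast PySem.Int.floordiv_natCast 1024 (2 ^ (b + 1))
    rw [hhalfI, hstrideI, PySem.List.pyRange_one]
    simp only [Int.sub_zero, Int.toNat_natCast]
    rw [List.foldl_map, foldl_pair_append]
    simp only [List.nil_append]
    rw [show (2 : Nat) ^ (b + 1) = 2 ^ b + 2 ^ b from by ring, List.range_add, List.map_append]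
    have hSD' : 2 ^ (b + 1) * 2 ^ (10 - (b + 1)) = 1024 := by
      rw [← pow_add, show b + 1 + (10 - (b + 1)) = 10 from by omega]
      norm_num
    have htwb : ∀ p, p < 2 ^ b → p * 2 ^ (10 - (b + 1)) < 512 := by
      intro p hp
      have hm : p * 2 ^ (10 - (b + 1)) < 2 ^ b * 2 ^ (10 - (b + 1)) :=
        (Nat.mul_lt_mul_right (Nat.pow_pos (show 0 < 2 by omega))).mpr hp
      have h512 : 2 ^ b * 2 ^ (10 - (b + 1)) = 512 := by
        rw [← pow_add, show b + (10 - (b + 1)) = 9 from by omega]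
        norm_num
      omega
    congr 1
    · -- first half: outputs 0 .. 2^b-1
      apply List.map_congr_left
      intro p hp
      simp only [List.mem_range] at hp
      rw [zero_add]
      rw [show ((p : Int) * ((2 ^ (10 - (b + 1)) : Nat) : Int)) = ((p * 2 ^ (10 - (b + 1)) : Nat) : Int) from by push_cast; ring]
      simp only [PySem.List.pyGetD_natCast]
      rw [PySem.List.getD_map_range _ _ _ _ hp, PySem.List.getD_map_range _ _ _ _ hp,
        List.getD_eq_getElem?_getD]
      rw [show (tw_r.zip tw_i)[p * 2 ^ (10 - (b + 1))]?.getD (0, 0) = twF tw_r tw_i (p * 2 ^ (10 - (b + 1))) from by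
        rw [← List.getD_eq_getElem?_getD]
        exact zip_getD tw_r tw_i _ (by have := htwb p hp; omega) (by have := htwb p hp; omega)]
      simp only [RF, TF]
      have hplt : p < 2 ^ (b + 1) := by omega
      rw [Nat.mod_eq_of_lt hplt]
      have hhalfN : (2 : Nat) ^ (b + 1) / 2 = 2 ^ b := by omega
      rw [hhalfN, if_pos hp, hdivN]
      have hEp : RF tw_r tw_i b (fun q => g (revN (b + 1) q)) p
          = RF tw_r tw_i b (fun q => g (2 * revN b q)) p := by
        have := RF_shift tw_r tw_i b (fun q => g (revN (b + 1) q)) (fun q => g (2 * revN b q)) 0 0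
          (by intro q hq
              simp only [Nat.zero_mul, Nat.add_zero]
              rw [revN_double b q hq]) p hp
        simpa using this
      have hOp : RF tw_r tw_i b (fun q => g (revN (b + 1) q)) (p + 2 ^ b)
          = RF tw_r tw_i b (fun q => g (2 * revN b q + 1)) p := by
        have := RF_shift tw_r tw_i b (fun q => g (revN (b + 1) q)) (fun q => g (2 * revN b q + 1)) 1 0
          (by intro q hq
              simp only [Nat.one_mul, Nat.zero_mul, Nat.add_zero]
              rw [revN_double_add b q hq]) p hp
        simpa using this
      rw [hEp, hOp, q15_cmul_eq]
    · -- second half: outputs 2^b .. 2^(b+1)-1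
      rw [List.map_map]
      apply List.map_congr_left
      intro p hp
      simp only [List.mem_range, Function.comp] at hp ⊢
      rw [zero_add]
      rw [show ((p : Int) * ((2 ^ (10 - (b + 1)) : Nat) : Int)) = ((p * 2 ^ (10 - (b + 1)) : Nat) : Int) from by push_cast; ring]
      simp only [PySem.List.pyGetD_natCast]
      rw [PySem.List.getD_map_range _ _ _ _ hp, PySem.List.getD_map_range _ _ _ _ hp,
        List.getD_eq_getElem?_getD]
      rw [show (tw_r.zip tw_i)[p * 2 ^ (10 - (b + 1))]?.getD (0, 0) = twF tw_r tw_i (p * 2 ^ (10 - (b + 1))) from by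
        rw [← List.getD_eq_getElem?_getD]
        exact zip_getD tw_r tw_i _ (by have := htwb p hp; omega) (by have := htwb p hp; omega)]
      simp only [RF, TF]
      have hplt : 2 ^ b + p < 2 ^ (b + 1) := by omega
      rw [Nat.mod_eq_of_lt hplt]
      have hhalfN : (2 : Nat) ^ (b + 1) / 2 = 2 ^ b := by omega
      rw [hhalfN, if_neg (by omega), hdivN]
      rw [show 2 ^ b + p - 2 ^ b = p from by omega]
      have hEp : RF tw_r tw_i b (fun q => g (revN (b + 1) q)) p
          = RF tw_r tw_i b (fun q => g (2 * revN b q)) p := by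
        have := RF_shift tw_r tw_i b (fun q => g (revN (b + 1) q)) (fun q => g (2 * revN b q)) 0 0
          (by intro q hq
              simp only [Nat.zero_mul, Nat.add_zero]
              rw [revN_double b q hq]) p hp
        simpa using this
      have hOp : RF tw_r tw_i b (fun q => g (revN (b + 1) q)) (2 ^ b + p)
          = RF tw_r tw_i b (fun q => g (2 * revN b q + 1)) p := by
        have := RF_shift tw_r tw_i b (fun q => g (revN (b + 1) q)) (fun q => g (2 * revN b q + 1)) 1 0
          (by intro q hq
              simp only [Nat.one_mul, Nat.zero_mul, Nat.add_zero]
              rw [revN_double_add b q hq]) p hp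
        rw [Nat.add_comm (2 ^ b) p]
        simpa using this
      rw [hEp, hOp, q15_cmul_eq]


-- ===== VERDICT (by name: the statement is the Claim_ definition above) =====

theorem radix2_dit_fft_bittrue_spec : Claim_equal_radix2_dit_fft_bittrue := by
  intro x_r x_i tw_r tw_i n_points _ hpre
  unfold Spec_radix2_dit_fft_bittrue
  rcases hpre with hneg | ⟨h1024, hxr, hxi, htr, hti⟩
  · -- n_points ≤ 0 : every loop is empty and both sides return ([], [])
    have htN : n_points.toNat = 0 := by omega
    unfold radix2_dit_fft_bittrue radix2_dit_fft_bittrue_alt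
    dsimp only
    rw [PySem.List.pyRange_one_eq_nil (by omega), htN]
    simp only [List.map_nil, List.foldl_nil, List.replicate_zero]
    have hst : ∀ (acc : List Int × List Int) (st : Int), st ∈ PySem.List.pyRange 1 (10 + 1) 1 →
        stageA tw_r tw_i n_points ((1 : Int) <<< ((st.toNat : Nat) : Int)) acc = acc := by
      intro acc st _
      unfold stageA
      rw [PySem.List.pyRange_of_pos 0 n_points (show (0 : Int) < (1 : Int) <<< ((st.toNat : Nat) : Int) from by
            rw [Int.one_shiftLeft]
            have h2 := Nat.pow_pos (n := st.toNat) (show 0 < 2 by omega)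
            omega),
        if_neg (by omega), List.range_zero, List.map_nil, List.foldl_nil]
    rw [PySem.List.foldl_congr_mem _ _ (fun acc _ => acc) _ hst, PySem.List.foldl_ignore]
    rw [fftB]
    rw [dif_pos (by simp)]
    simp only [List.map_nil]
  · -- n_points = 1024 : A's iterative in-place FFT equals B's recursion
    subst h1024
    have hA : radix2_dit_fft_bittrue x_r x_i tw_r tw_i 1024
        = (mapR (RF tw_r tw_i 10 (fun p : Nat => (x_r.getD (revN 10 p) 0, x_i.getD (revN 10 p) 0))), mapI (RF tw_r tw_i 10 (fun p : Nat => (x_r.getD (revN 10 p) 0, x_i.getD (revN 10 p) 0)))) := by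
      unfold radix2_dit_fft_bittrue
      dsimp only
      rw [show ((1024 : Int)).toNat = 1024 from by omega, replicate_eq_map_range,
        PySem.List.pyRange_one, show ((1024 : Int) - 0).toNat = 1024 from by omega,
        List.foldl_map]
      rw [PySem.List.foldl_congr_mem _ _
          (fun (X : List Int × List Int) (k : Nat) =>
            (PySem.List.pySetD X.1 (bit_reverse (k : Int) 10) (PySem.List.pyGetD x_r (k : Int) 0),
             PySem.List.pySetD X.2 (bit_reverse (k : Int) 10) (PySem.List.pyGetD x_i (k : Int) 0))) _
          (by intro acc k _; rw [zero_add])]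
      rw [PySem.List.foldl_prod_mk
          (f := fun (X : List Int) (k : Nat) => PySem.List.pySetD X (bit_reverse (k : Int) 10) (PySem.List.pyGetD x_r (k : Int) 0))
          (g := fun (X : List Int) (k : Nat) => PySem.List.pySetD X (bit_reverse (k : Int) 10) (PySem.List.pyGetD x_i (k : Int) 0))]
      rw [setrev_loop x_r 1024 (le_refl _), setrev_loop x_i 1024 (le_refl _)]
      have hxmap : ∀ (xs : List Int),
          (List.range 1024).map (fun p => if revN 10 p < 1024 then xs.getD (revN 10 p) 0 else 0)
            = (List.range 1024).map (fun p => xs.getD (revN 10 p) 0) := by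
        intro xs
        apply List.map_congr_left
        intro p _
        rw [if_pos (show revN 10 p < 1024 from by have := revN_lt 10 p; omega)]
      rw [hxmap, hxmap]
      have hstart :
          ((List.range 1024).map (fun p => x_r.getD (revN 10 p) 0),
           (List.range 1024).map (fun p => x_i.getD (revN 10 p) 0))
          = (mapR (RF tw_r tw_i 0 (fun p : Nat => (x_r.getD (revN 10 p) 0, x_i.getD (revN 10 p) 0))), mapI (RF tw_r tw_i 0 (fun p : Nat => (x_r.getD (revN 10 p) 0, x_i.getD (revN 10 p) 0)))) := by
        rw [Prod.mk.injEq]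
        exact ⟨List.map_congr_left (fun p _ => rfl), List.map_congr_left (fun p _ => rfl)⟩
      rw [hstart]
      rw [show PySem.List.pyRange 1 (10 + 1) 1 = [1, 2, 3, 4, 5, 6, 7, 8, 9, 10] from by decide]
      simp only [List.foldl_cons, List.foldl_nil]
      simp only [Int.one_shiftLeft]
      simp only [show Int.toNat 1 = 1 from rfl, show Int.toNat 2 = 2 from rfl, show Int.toNat 3 = 3 from rfl, show Int.toNat 4 = 4 from rfl, show Int.toNat 5 = 5 from rfl, show Int.toNat 6 = 6 from rfl, show Int.toNat 7 = 7 from rfl, show Int.toNat 8 = 8 from rfl, show Int.toNat 9 = 9 from rfl, show Int.toNat 10 = 10 from rfl]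
      have st1 : stageA tw_r tw_i 1024 ((2 ^ 1 : Nat) : Int)
          (mapR (RF tw_r tw_i 0 (fun p : Nat => (x_r.getD (revN 10 p) 0, x_i.getD (revN 10 p) 0))), mapI (RF tw_r tw_i 0 (fun p : Nat => (x_r.getD (revN 10 p) 0, x_i.getD (revN 10 p) 0))))
          = (mapR (RF tw_r tw_i 1 (fun p : Nat => (x_r.getD (revN 10 p) 0, x_i.getD (revN 10 p) 0))), mapI (RF tw_r tw_i 1 (fun p : Nat => (x_r.getD (revN 10 p) 0, x_i.getD (revN 10 p) 0)))) :=
        stage_eq tw_r tw_i 1 (by omega) (by omega) (RF tw_r tw_i 0 (fun p : Nat => (x_r.getD (revN 10 p) 0, x_i.getD (revN 10 p) 0)))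
      have st2 : stageA tw_r tw_i 1024 ((2 ^ 2 : Nat) : Int)
          (mapR (RF tw_r tw_i 1 (fun p : Nat => (x_r.getD (revN 10 p) 0, x_i.getD (revN 10 p) 0))), mapI (RF tw_r tw_i 1 (fun p : Nat => (x_r.getD (revN 10 p) 0, x_i.getD (revN 10 p) 0))))
          = (mapR (RF tw_r tw_i 2 (fun p : Nat => (x_r.getD (revN 10 p) 0, x_i.getD (revN 10 p) 0))), mapI (RF tw_r tw_i 2 (fun p : Nat => (x_r.getD (revN 10 p) 0, x_i.getD (revN 10 p) 0)))) :=
        stage_eq tw_r tw_i 2 (by omega) (by omega) (RF tw_r tw_i 1 (fun p : Nat => (x_r.getD (revN 10 p) 0, x_i.getD (revN 10 p) 0)))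
      have st3 : stageA tw_r tw_i 1024 ((2 ^ 3 : Nat) : Int)
          (mapR (RF tw_r tw_i 2 (fun p : Nat => (x_r.getD (revN 10 p) 0, x_i.getD (revN 10 p) 0))), mapI (RF tw_r tw_i 2 (fun p : Nat => (x_r.getD (revN 10 p) 0, x_i.getD (revN 10 p) 0))))
          = (mapR (RF tw_r tw_i 3 (fun p : Nat => (x_r.getD (revN 10 p) 0, x_i.getD (revN 10 p) 0))), mapI (RF tw_r tw_i 3 (fun p : Nat => (x_r.getD (revN 10 p) 0, x_i.getD (revN 10 p) 0)))) :=
        stage_eq tw_r tw_i 3 (by omega) (by omega) (RF tw_r tw_i 2 (fun p : Nat => (x_r.getD (revN 10 p) 0, x_i.getD (revN 10 p) 0)))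
      have st4 : stageA tw_r tw_i 1024 ((2 ^ 4 : Nat) : Int)
          (mapR (RF tw_r tw_i 3 (fun p : Nat => (x_r.getD (revN 10 p) 0, x_i.getD (revN 10 p) 0))), mapI (RF tw_r tw_i 3 (fun p : Nat => (x_r.getD (revN 10 p) 0, x_i.getD (revN 10 p) 0))))
          = (mapR (RF tw_r tw_i 4 (fun p : Nat => (x_r.getD (revN 10 p) 0, x_i.getD (revN 10 p) 0))), mapI (RF tw_r tw_i 4 (fun p : Nat => (x_r.getD (revN 10 p) 0, x_i.getD (revN 10 p) 0)))) :=
        stage_eq tw_r tw_i 4 (by omega) (by omega) (RF tw_r tw_i 3 (fun p : Nat => (x_r.getD (revN 10 p) 0, x_i.getD (revN 10 p) 0)))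
      have st5 : stageA tw_r tw_i 1024 ((2 ^ 5 : Nat) : Int)
          (mapR (RF tw_r tw_i 4 (fun p : Nat => (x_r.getD (revN 10 p) 0, x_i.getD (revN 10 p) 0))), mapI (RF tw_r tw_i 4 (fun p : Nat => (x_r.getD (revN 10 p) 0, x_i.getD (revN 10 p) 0))))
          = (mapR (RF tw_r tw_i 5 (fun p : Nat => (x_r.getD (revN 10 p) 0, x_i.getD (revN 10 p) 0))), mapI (RF tw_r tw_i 5 (fun p : Nat => (x_r.getD (revN 10 p) 0, x_i.getD (revN 10 p) 0)))) :=
        stage_eq tw_r tw_i 5 (by omega) (by omega) (RF tw_r tw_i 4 (fun p : Nat => (x_r.getD (revN 10 p) 0, x_i.getD (revN 10 p) 0)))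
      have st6 : stageA tw_r tw_i 1024 ((2 ^ 6 : Nat) : Int)
          (mapR (RF tw_r tw_i 5 (fun p : Nat => (x_r.getD (revN 10 p) 0, x_i.getD (revN 10 p) 0))), mapI (RF tw_r tw_i 5 (fun p : Nat => (x_r.getD (revN 10 p) 0, x_i.getD (revN 10 p) 0))))
          = (mapR (RF tw_r tw_i 6 (fun p : Nat => (x_r.getD (revN 10 p) 0, x_i.getD (revN 10 p) 0))), mapI (RF tw_r tw_i 6 (fun p : Nat => (x_r.getD (revN 10 p) 0, x_i.getD (revN 10 p) 0)))) :=
        stage_eq tw_r tw_i 6 (by omega) (by omega) (RF tw_r tw_i 5 (fun p : Nat => (x_r.getD (revN 10 p) 0, x_i.getD (revN 10 p) 0)))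
      have st7 : stageA tw_r tw_i 1024 ((2 ^ 7 : Nat) : Int)
          (mapR (RF tw_r tw_i 6 (fun p : Nat => (x_r.getD (revN 10 p) 0, x_i.getD (revN 10 p) 0))), mapI (RF tw_r tw_i 6 (fun p : Nat => (x_r.getD (revN 10 p) 0, x_i.getD (revN 10 p) 0))))
          = (mapR (RF tw_r tw_i 7 (fun p : Nat => (x_r.getD (revN 10 p) 0, x_i.getD (revN 10 p) 0))), mapI (RF tw_r tw_i 7 (fun p : Nat => (x_r.getD (revN 10 p) 0, x_i.getD (revN 10 p) 0)))) :=
        stage_eq tw_r tw_i 7 (by omega) (by omega) (RF tw_r tw_i 6 (fun p : Nat => (x_r.getD (revN 10 p) 0, x_i.getD (revN 10 p) 0)))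
      have st8 : stageA tw_r tw_i 1024 ((2 ^ 8 : Nat) : Int)
          (mapR (RF tw_r tw_i 7 (fun p : Nat => (x_r.getD (revN 10 p) 0, x_i.getD (revN 10 p) 0))), mapI (RF tw_r tw_i 7 (fun p : Nat => (x_r.getD (revN 10 p) 0, x_i.getD (revN 10 p) 0))))
          = (mapR (RF tw_r tw_i 8 (fun p : Nat => (x_r.getD (revN 10 p) 0, x_i.getD (revN 10 p) 0))), mapI (RF tw_r tw_i 8 (fun p : Nat => (x_r.getD (revN 10 p) 0, x_i.getD (revN 10 p) 0)))) :=
        stage_eq tw_r tw_i 8 (by omega) (by omega) (RF tw_r tw_i 7 (fun p : Nat => (x_r.getD (revN 10 p) 0, x_i.getD (revN 10 p) 0)))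
      have st9 : stageA tw_r tw_i 1024 ((2 ^ 9 : Nat) : Int)
          (mapR (RF tw_r tw_i 8 (fun p : Nat => (x_r.getD (revN 10 p) 0, x_i.getD (revN 10 p) 0))), mapI (RF tw_r tw_i 8 (fun p : Nat => (x_r.getD (revN 10 p) 0, x_i.getD (revN 10 p) 0))))
          = (mapR (RF tw_r tw_i 9 (fun p : Nat => (x_r.getD (revN 10 p) 0, x_i.getD (revN 10 p) 0))), mapI (RF tw_r tw_i 9 (fun p : Nat => (x_r.getD (revN 10 p) 0, x_i.getD (revN 10 p) 0)))) :=
        stage_eq tw_r tw_i 9 (by omega) (by omega) (RF tw_r tw_i 8 (fun p : Nat => (x_r.getD (revN 10 p) 0, x_i.getD (revN 10 p) 0)))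
      have st10 : stageA tw_r tw_i 1024 ((2 ^ 10 : Nat) : Int)
          (mapR (RF tw_r tw_i 9 (fun p : Nat => (x_r.getD (revN 10 p) 0, x_i.getD (revN 10 p) 0))), mapI (RF tw_r tw_i 9 (fun p : Nat => (x_r.getD (revN 10 p) 0, x_i.getD (revN 10 p) 0))))
          = (mapR (RF tw_r tw_i 10 (fun p : Nat => (x_r.getD (revN 10 p) 0, x_i.getD (revN 10 p) 0))), mapI (RF tw_r tw_i 10 (fun p : Nat => (x_r.getD (revN 10 p) 0, x_i.getD (revN 10 p) 0)))) :=
        stage_eq tw_r tw_i 10 (by omega) (by omega) (RF tw_r tw_i 9 (fun p : Nat => (x_r.getD (revN 10 p) 0, x_i.getD (revN 10 p) 0)))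
      rw [st1, st2, st3, st4, st5, st6, st7, st8, st9, st10]
    have hB : radix2_dit_fft_bittrue_alt x_r x_i tw_r tw_i 1024
        = (mapR (RF tw_r tw_i 10 (fun p : Nat => (x_r.getD (revN 10 p) 0, x_i.getD (revN 10 p) 0))), mapI (RF tw_r tw_i 10 (fun p : Nat => (x_r.getD (revN 10 p) 0, x_i.getD (revN 10 p) 0)))) := by
      unfold radix2_dit_fft_bittrue_alt
      dsimp only
      rw [PySem.List.pyRange_one, show ((1024 : Int) - 0).toNat = 1024 from by omega,
        List.map_map]
      have hpts : (List.range 1024).map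
            ((fun i => (PySem.List.pyGetD x_r i 0, PySem.List.pyGetD x_i i 0)) ∘ (fun k : Nat => (0 : Int) + ↑k))
          = (List.range 1024).map (fun i : Nat => (x_r.getD i 0, x_i.getD i 0)) := by
        apply List.map_congr_left
        intro k _
        simp only [Function.comp_apply, zero_add, PySem.List.pyGetD_natCast]
      rw [hpts]
      have hfft := fftB_eq tw_r tw_i htr hti 10 (le_refl _) (fun i : Nat => (x_r.getD i 0, x_i.getD i 0))
      rw [show (2 : Nat) ^ 10 = 1024 from by norm_num] at hfft
      rw [hfft, List.map_map, List.map_map, Prod.mk.injEq]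
      exact ⟨List.map_congr_left (fun p _ => rfl), List.map_congr_left (fun p _ => rfl)⟩
    rw [hA, hB]
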